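-- pv_equiv track=rewrite | github.com/silentBit0/temp | playfair.py | prepare_plaintext
-- ===== SOURCE A (Python) =====
-- def prepare_plaintext(text):
--     text = text.upper().replace(" ", "")
--     text = text.replace("J", "I")
--     result = []
--     i = 0
--
--     while i < len(text):
--         a = text[i]
--         if i + 1 < len(text):
--             b = text[i + 1]
--         else:
--             result.append(a)
--             result.append("X")
--             break
--         if a == b:
--             result.append(a)
--             result.append("X")
--             i += 1
--         else:
--             result.append(a)
--             result.append(b)
--             i += 2
--     return result
-- ===== SOURCE B (Python) =====
-- def prepare_plaintext(text):
--     text = text.upper().replace(" ", "").replace("J", "I")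
--     result = []
--     prev = None
--     for c in text:
--         if prev is None:
--             prev = c
--         elif prev == c:
--             result.append(prev)
--             result.append("X")
--             prev = c
--         else:
--             result.append(prev)
--             result.append(c)
--             prev = None
--     if prev is not None:
--         result.append(prev)
--         result.append("X")
--     return result
-- ===== Notes on version B (the rewrite author's own statement) =====
-- stated objective: simpler
-- what changed: A's index-jump while loop (reads text[i] and text[i+1] by subscripting, advances by 1 or 2, breaks with an X-pad on a trailing char) is replaced by a single for loop iterating directly over the cleaned characters carrying one pending character `prev`, with the leftover prev X-padded after the loop.
import Mathlib
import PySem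

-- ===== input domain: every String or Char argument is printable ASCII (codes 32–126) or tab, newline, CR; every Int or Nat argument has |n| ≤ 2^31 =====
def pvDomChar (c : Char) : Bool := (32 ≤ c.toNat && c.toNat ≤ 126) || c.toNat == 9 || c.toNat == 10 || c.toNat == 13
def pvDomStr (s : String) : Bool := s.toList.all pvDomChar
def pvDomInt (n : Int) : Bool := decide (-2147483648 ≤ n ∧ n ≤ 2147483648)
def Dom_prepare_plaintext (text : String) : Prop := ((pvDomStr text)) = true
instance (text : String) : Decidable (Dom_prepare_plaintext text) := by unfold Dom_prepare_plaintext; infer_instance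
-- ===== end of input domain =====

-- B replaces A's index-jump while loop (advance by 1 or 2) with a single forward pass
-- carrying one pending character; objective: simpler (same cost).

-- shared preprocessing: text.upper().replace(" ", "").replace("J", "I"), as a char list
def ppClean (text : String) : List Char :=
  (PySem.Str.replace (PySem.Str.replace (PySem.Str.upper text) " " "") "J" "I").toList

-- ===== PORT A =====
-- A's while loop over index i, transcribed as recursion on the suffix text[i:]
-- (i += 1 drops one char, i += 2 drops two; 'i + 1 < len' = the suffix has a second char).
def ppLoopA : List Char → List String
  | [] => []
  | [a] => [String.ofList [a], "X"]
  | a :: b :: rest =>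
      if a == b then String.ofList [a] :: "X" :: ppLoopA (b :: rest)
      else String.ofList [a] :: String.ofList [b] :: ppLoopA rest

def prepare_plaintext (text : String) : List String :=
  ppLoopA (ppClean text)

-- ===== PORT B =====
-- B's for loop: state (result, prev); then the final padding of a leftover prev.
def ppStepB (st : List String × Option Char) (c : Char) : List String × Option Char :=
  match st.2 with
  | none => (st.1, some c)
  | some p =>
      if p == c then (st.1 ++ [String.ofList [p], "X"], some c)
      else (st.1 ++ [String.ofList [p], String.ofList [c]], none)

def ppFinB (st : List String × Option Char) : List String :=
  match st.2 with
  | none => st.1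
  | some p => st.1 ++ [String.ofList [p], "X"]

def prepare_plaintext_alt (text : String) : List String :=
  ppFinB ((ppClean text).foldl ppStepB ([], none))

-- ===== PRECONDITION & SPEC =====
def Spec_prepare_plaintext (text : String) (out : List String) : Prop := out = prepare_plaintext_alt text
instance (text : String) (out : List String) : Decidable (Spec_prepare_plaintext text out) := by unfold Spec_prepare_plaintext; infer_instance

-- ===== CLAIM (what is proved, stated in full; the proofs are below) =====
def Claim_equal_prepare_plaintext : Prop := ∀ (text : String), Dom_prepare_plaintext text → Spec_prepare_plaintext text (prepare_plaintext text)

-- ===== LEMMAS AND PROOFS =====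

theorem ppFold_eq (l : List Char) : ∀ res : List String,
    ppFinB (l.foldl ppStepB (res, none)) = res ++ ppLoopA l := by
  induction l using ppLoopA.induct with
  | case1 => intro res; simp [ppLoopA, ppFinB]
  | case2 a => intro res; simp [ppLoopA, ppFinB, ppStepB]
  | case3 a b rest hab ih =>
      intro res
      simp only [List.foldl_cons]
      have : ppStepB (res, none) a = (res, some a) := by simp [ppStepB]
      have h2 : ppStepB (res, some a) b = (res ++ [String.ofList [a], "X"], some b) := by
        simp [ppStepB, hab]
      calc ppFinB (List.foldl ppStepB (ppStepB (ppStepB (res, none) a) b) rest)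
          = ppFinB (List.foldl ppStepB (res ++ [String.ofList [a], "X"], some b) rest) := by
            rw [this, h2]
        _ = ppFinB (List.foldl ppStepB (ppStepB (res ++ [String.ofList [a], "X"], none) b) rest) := by
            simp [ppStepB]
        _ = ppFinB (List.foldl ppStepB (res ++ [String.ofList [a], "X"], none) (b :: rest)) := by
            simp [List.foldl_cons]
        _ = res ++ [String.ofList [a], "X"] ++ ppLoopA (b :: rest) := ih _
        _ = res ++ ppLoopA (a :: b :: rest) := by simp [ppLoopA, hab]
  | case4 a b rest hab ih =>
      intro res
      have h1 : ppStepB (res, none) a = (res, some a) := by simp [ppStepB]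
      have h2 : ppStepB (res, some a) b = (res ++ [String.ofList [a], String.ofList [b]], none) := by
        simp [ppStepB, hab]
      simp only [List.foldl_cons, h1, h2]
      rw [ih]
      simp [ppLoopA, hab]

-- ===== VERDICT (by name: the statement is the Claim_ definition above) =====
theorem prepare_plaintext_spec : Claim_equal_prepare_plaintext := by
  intro text _
  unfold Spec_prepare_plaintext prepare_plaintext prepare_plaintext_alt
  rw [ppFold_eq]
  simp
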